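-- pv_equiv track=rewrite | github.com/matdomino/Pygame-project | fasolki/czysasiednie.py | pary
-- ===== SOURCE A (Python) =====
-- def pary(lista_oczekiwana,lita_wpisana):
--     pary = 0
--     for x in range (len(lita_wpisana)):
--         for y in range(len(lita_wpisana)-1):
--             liczba1 = lita_wpisana[x][y]
--             liczba2 = lita_wpisana[x][y+1]
--             for a in range(len(lista_oczekiwana)):
--                 for b in range(len(lista_oczekiwana)-1):
--                     if lista_oczekiwana[a][b] == liczba1 and lista_oczekiwana[a][b+1] == liczba2:
--                         pary = pary + 1
--                     elif lista_oczekiwana[a][b] == liczba2 and lista_oczekiwana[a][b+1] == liczba1: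
--                         pary = pary + 1
--     return pary
-- ===== SOURCE B (Python) =====
-- def pary(lista_oczekiwana, lita_wpisana):
--     cnt = {}
--     for row in lista_oczekiwana:
--         for p in zip(row, row[1:]):
--             cnt[p] = cnt.get(p, 0) + 1
--     total = 0
--     for row in lita_wpisana:
--         for l1, l2 in zip(row, row[1:]):
--             total += cnt.get((l1, l2), 0)
--             if l1 != l2:
--                 total += cnt.get((l2, l1), 0)
--     return total
-- ===== Notes on version B (the rewrite author's own statement) =====
-- stated objective: faster
-- what changed: A compares every adjacent pair of wpisana against every adjacent pair of oczekiwana in four nested index loops, using each list's ROW COUNT as the column bound; B builds a dict counting all adjacent pairs of oczekiwana's rows once and answers each wpisana pair with two dict lookups (the pair and its reverse). Pre_ excludes inputs where A raises IndexError because a row is shorter than its list's row count.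
-- intended difference: On grids where an adjacent pair beyond A's accidental column bound (column index >= len(list)-1, the row count; in particular every pair of a 1-row grid) matches a counted pair, A silently omits those matches and returns an undercount, while B counts every adjacent pair of every row, which is the intended value. — e.g. on pary([[1, 2], [9, 9]], [[1, 2, 3]]): A returns 0, B returns 1
-- outside the precondition, e.g. on pary([[1, 2], [3]], [[9, 9], [8, 8]]): A returns 0, B returns 0
import Mathlib
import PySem

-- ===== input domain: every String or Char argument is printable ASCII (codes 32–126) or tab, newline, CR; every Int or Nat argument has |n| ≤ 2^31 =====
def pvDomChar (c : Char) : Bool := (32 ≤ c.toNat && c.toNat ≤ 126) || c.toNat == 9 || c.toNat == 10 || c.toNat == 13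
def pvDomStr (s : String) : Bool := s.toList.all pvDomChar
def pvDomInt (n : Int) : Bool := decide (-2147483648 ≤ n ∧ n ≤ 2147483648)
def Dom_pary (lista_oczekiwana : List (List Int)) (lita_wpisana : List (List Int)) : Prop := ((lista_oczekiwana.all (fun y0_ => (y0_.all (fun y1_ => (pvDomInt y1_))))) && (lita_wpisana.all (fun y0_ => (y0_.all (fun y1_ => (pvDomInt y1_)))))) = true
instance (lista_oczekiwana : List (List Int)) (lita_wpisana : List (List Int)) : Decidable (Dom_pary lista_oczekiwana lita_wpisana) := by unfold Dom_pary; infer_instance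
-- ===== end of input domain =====

-- B replaces A's four nested index loops by a dictionary of oczekiwana adjacent-pair
-- counts built once, then lookups per wpisana pair (objective: faster); on pairs beyond
-- A's accidental column bound (the row count) the two differ, stated in D_pary below.

-- ===== PORT A =====
def pary (lista_oczekiwana : List (List Int)) (lita_wpisana : List (List Int)) : Int :=
  List.foldl (fun pary0 x =>
    List.foldl (fun pary0 y =>
      let liczba1 := PySem.List.pyGetD (PySem.List.pyGetD lita_wpisana x []) y 0
      let liczba2 := PySem.List.pyGetD (PySem.List.pyGetD lita_wpisana x []) (y + 1) 0
      List.foldl (fun pary0 a =>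
        List.foldl (fun pary0 b =>
          if PySem.List.pyGetD (PySem.List.pyGetD lista_oczekiwana a []) b 0 = liczba1 ∧
             PySem.List.pyGetD (PySem.List.pyGetD lista_oczekiwana a []) (b + 1) 0 = liczba2 then
            pary0 + 1
          else if PySem.List.pyGetD (PySem.List.pyGetD lista_oczekiwana a []) b 0 = liczba2 ∧
             PySem.List.pyGetD (PySem.List.pyGetD lista_oczekiwana a []) (b + 1) 0 = liczba1 then
            pary0 + 1
          else pary0)
          pary0 (PySem.List.pyRange 0 (PySem.List.len lista_oczekiwana - 1)))
        pary0 (PySem.List.pyRange 0 (PySem.List.len lista_oczekiwana)))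
      pary0 (PySem.List.pyRange 0 (PySem.List.len lita_wpisana - 1)))
    0 (PySem.List.pyRange 0 (PySem.List.len lita_wpisana))

-- ===== PORT B =====
def pary_alt (lista_oczekiwana : List (List Int)) (lita_wpisana : List (List Int)) : Int :=
  let cnt := List.foldl (fun d row =>
      List.foldl (fun d p => d.insert p (d.getD p 0 + 1)) d
        (row.zip (PySem.List.slice row (some 1) none)))
    PySem.Dict.empty lista_oczekiwana
  List.foldl (fun total row =>
      List.foldl (fun total p =>
          let total := total + cnt.getD (p.1, p.2) 0
          if p.1 ≠ p.2 then total + cnt.getD (p.2, p.1) 0 else total)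
        total (row.zip (PySem.List.slice row (some 1) none)))
    0 lita_wpisana

-- ===== PRECONDITION & SPEC =====
-- A indexes every wpisana row at 0..len(wpisana)-1 and (when both grids have ≥ 2 rows)
-- every oczekiwana row at 0..len(oczekiwana)-1, raising IndexError on shorter rows.
-- Pre_ is slightly narrower than A's exact return set: thanks to `and` short-circuiting,
-- A can also return when an oczekiwana row has exactly len(oczekiwana)-1 entries and its
-- last entry happens to match no wpisana pair; Pre_ excludes that value-dependent luck.
def Pre_pary (lista_oczekiwana : List (List Int)) (lita_wpisana : List (List Int)) : Prop :=
  (2 ≤ lita_wpisana.length → ∀ row ∈ lita_wpisana, lita_wpisana.length ≤ row.length) ∧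
  (2 ≤ lita_wpisana.length → 2 ≤ lista_oczekiwana.length →
    ∀ row ∈ lista_oczekiwana, lista_oczekiwana.length ≤ row.length)
instance (lista_oczekiwana : List (List Int)) (lita_wpisana : List (List Int)) : Decidable (Pre_pary lista_oczekiwana lita_wpisana) := by unfold Pre_pary; infer_instance

def pvWitness_pary : List (List Int) × List (List Int) := ([[1, 2], [2, 3]], [[1, 2], [3, 1]])

-- pairsFrom g k: the adjacent pairs of g's rows from column k on (k = 0: all of them;
-- k = row count - 1: exactly the ones A's accidental column bound drops); hits says some
-- wpisana pair from column j on matches (directly or reversed) some oczekiwana pair from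
-- column k on
def pairsFrom (g : List (List Int)) (k : Nat) : List (Int × Int) :=
  g.flatMap fun r => (r.zip r.tail).drop k
def hits (o w : List (List Int)) (j k : Nat) : Prop :=
  ∃ p ∈ pairsFrom w j, ∃ q ∈ pairsFrom o k, q = p ∨ q = (p.2, p.1)

-- On grids where an adjacent pair beyond A's accidental column bound (column index
-- ≥ len(list)-1, the row count; in particular every pair of a 1-row grid) matches a
-- counted pair, A silently omits those matches and returns an undercount, while B
-- counts every adjacent pair of every row, which is the intended value.
def D_pary (lista_oczekiwana : List (List Int)) (lita_wpisana : List (List Int)) : Prop :=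
  hits lista_oczekiwana lita_wpisana (lita_wpisana.length - 1) 0 ∨
  hits lista_oczekiwana lita_wpisana 0 (lista_oczekiwana.length - 1)
instance (lista_oczekiwana : List (List Int)) (lita_wpisana : List (List Int)) : Decidable (D_pary lista_oczekiwana lita_wpisana) := by unfold D_pary hits; infer_instance

def Spec_pary (lista_oczekiwana : List (List Int)) (lita_wpisana : List (List Int)) (out : Int) : Prop := ¬ D_pary lista_oczekiwana lita_wpisana → out = pary_alt lista_oczekiwana lita_wpisana
instance (lista_oczekiwana : List (List Int)) (lita_wpisana : List (List Int)) (out : Int) : Decidable (Spec_pary lista_oczekiwana lita_wpisana out) := by unfold Spec_pary; infer_instance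

def pvDiffWitness_pary : List (List Int) × List (List Int) := ([[1, 2], [9, 9]], [[1, 2, 3]])
def pvDiffWitnessOut_pary : Int × Int := (0, 1)

-- ===== CLAIM (what is proved, stated in full; the proofs are below) =====
def Claim_unchanged_pary : Prop := ∀ (lista_oczekiwana : List (List Int)) (lita_wpisana : List (List Int)), Dom_pary lista_oczekiwana lita_wpisana → Pre_pary lista_oczekiwana lita_wpisana → Spec_pary lista_oczekiwana lita_wpisana (pary lista_oczekiwana lita_wpisana)
def Claim_changed_pary : Prop := Dom_pary (pvDiffWitness_pary.1) (pvDiffWitness_pary.2) ∧ Pre_pary (pvDiffWitness_pary.1) (pvDiffWitness_pary.2) ∧ D_pary (pvDiffWitness_pary.1) (pvDiffWitness_pary.2) ∧ pary (pvDiffWitness_pary.1) (pvDiffWitness_pary.2) = pvDiffWitnessOut_pary.1 ∧ pary_alt (pvDiffWitness_pary.1) (pvDiffWitness_pary.2) = pvDiffWitnessOut_pary.2 ∧ pvDiffWitnessOut_pary.1 ≠ pvDiffWitnessOut_pary.2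
def Claim_exact_pary : Prop := ∀ (lista_oczekiwana : List (List Int)) (lita_wpisana : List (List Int)), Dom_pary lista_oczekiwana lita_wpisana → Pre_pary lista_oczekiwana lita_wpisana → D_pary lista_oczekiwana lita_wpisana → pary lista_oczekiwana lita_wpisana ≠ pary_alt lista_oczekiwana lita_wpisana

-- ===== LEMMAS AND PROOFS =====

-- proof-side names for the pair families D_pary talks about
def adjPairs (r : List Int) : List (Int × Int) := r.zip r.tail
def matchB (p q : Int × Int) : Bool := q == p || q == (p.2, p.1)

lemma matchB_iff {p q : Int × Int} : matchB p q = true ↔ (q = p ∨ q = (p.2, p.1)) := by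
  simp [matchB]
def keptPairs (g : List (List Int)) : List (Int × Int) :=
  g.flatMap (fun r => (adjPairs r).take (g.length - 1))
def dropPairs (g : List (List Int)) : List (Int × Int) :=
  g.flatMap (fun r => (adjPairs r).drop (g.length - 1))
def allPairs (g : List (List Int)) : List (Int × Int) := g.flatMap adjPairs

lemma pairsFrom_zero (g : List (List Int)) : pairsFrom g 0 = allPairs g := by
  unfold pairsFrom allPairs adjPairs
  simp

lemma pairsFrom_bound (g : List (List Int)) : pairsFrom g (g.length - 1) = dropPairs g := rfl

lemma kept_mem_all {p : Int × Int} {g : List (List Int)} (h : p ∈ keptPairs g) :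
    p ∈ allPairs g := by
  simp only [keptPairs, allPairs, List.mem_flatMap] at h ⊢
  obtain ⟨r, hr, hp⟩ := h
  exact ⟨r, hr, List.mem_of_mem_take hp⟩

-- the adjacent pairs of the first k entries of a row
def rowPairs (k : Nat) (r : List Int) : List (Int × Int) :=
  (r.take k).zip (r.take k).tail

-- all adjacent pairs a grid contributes under A's bound (k = number of rows)
def gridPairs (g : List (List Int)) : List (Int × Int) :=
  g.flatMap (rowPairs g.length)

-- how often the unordered pair p occurs among op (ordered match counted once when p.1 = p.2)
def score (op : List (Int × Int)) (p : Int × Int) : Int :=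
  op.count (p.1, p.2) + (if p.1 = p.2 then 0 else op.count (p.2, p.1))

-- number of elements of Y matching p, and the total match count of X against Y
def cntM (Y : List (Int × Int)) (p : Int × Int) : Nat := Y.countP (matchB p)
def totS (X Y : List (Int × Int)) : Nat := (X.map (cntM Y)).sum

lemma rowPairs_eq_map_range (k : Nat) (r : List Int) (hk : k ≤ r.length) :
    rowPairs k r = (List.range (k - 1)).map (fun j => (r.getD j 0, r.getD (j + 1) 0)) := by
  have ht : (r.take k).length = k := by simp [Nat.min_eq_left hk]
  apply List.ext_getElem
  · simp [rowPairs, ht]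
  · intro i h1 h2
    have hi : i < k - 1 := by simpa [rowPairs, ht] using h1
    simp only [rowPairs, List.getElem_zip, List.getElem_tail, List.getElem_take,
      List.getElem_map, List.getElem_range, List.getD]
    rw [List.getElem?_eq_getElem (by omega : i < r.length),
      List.getElem?_eq_getElem (by omega : i + 1 < r.length)]
    rfl

lemma rowPairs_small (k : Nat) (hk : k ≤ 1) (r : List Int) : rowPairs k r = [] := by
  have : k = 0 ∨ k = 1 := by omega
  rcases this with h | h <;> subst h
  · simp [rowPairs]
  · cases r <;> simp [rowPairs]

lemma rowPairs_eq_take (k : Nat) (r : List Int) :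
    rowPairs k r = (adjPairs r).take (k - 1) := by
  apply List.ext_getElem
  · simp only [rowPairs, adjPairs, List.length_take, List.length_zip, List.length_tail]
    omega
  · intro i h1 h2
    have hi : i + 1 < r.length ∧ i + 1 < k := by
      constructor <;>
        · simp only [rowPairs, List.length_zip, List.length_take, List.length_tail] at h1
          omega
    simp [rowPairs, adjPairs, List.getElem_zip, List.getElem_tail, List.getElem_take]

lemma gridPairs_eq_kept (g : List (List Int)) : gridPairs g = keptPairs g := by
  unfold gridPairs keptPairs
  exact List.flatMap_congr (fun r _ => rowPairs_eq_take g.length r)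

lemma foldl_idx_eq_foldl_rowPairs {β : Type} (r : List Int) (k : Nat) (hk : k ≤ r.length)
    (h : β → Int → Int → β) (acc : β) :
    List.foldl (fun acc y => h acc (PySem.List.pyGetD r y 0) (PySem.List.pyGetD r (y + 1) 0))
      acc (PySem.List.pyRange 0 ((k : Int) - 1))
    = List.foldl (fun acc p => h acc p.1 p.2) acc (rowPairs k r) := by
  rw [PySem.List.pyRange_one, rowPairs_eq_map_range k r hk, List.foldl_map, List.foldl_map]
  have hrange : ((k : Int) - 1 - 0).toNat = k - 1 := by omega
  rw [hrange]
  apply PySem.List.foldl_congr_mem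
  intro acc j hj
  have h2 : ((j : Int) + 1) = (((j + 1 : Nat)) : Int) := by push_cast; ring
  simp only [zero_add, h2, PySem.List.pyGetD_natCast]

lemma count_fold (l1 l2 : Int) (op : List (Int × Int)) (acc : Int) :
    List.foldl (fun acc q =>
        if q.1 = l1 ∧ q.2 = l2 then acc + 1
        else if q.1 = l2 ∧ q.2 = l1 then acc + 1
        else acc) acc op
    = acc + score op (l1, l2) := by
  induction op generalizing acc with
  | nil => simp [score]
  | cons q op ih =>
    obtain ⟨qa, qb⟩ := q
    rw [List.foldl_cons, ih]
    simp only [score, List.count_cons, beq_iff_eq, Prod.mk.injEq]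
    split_ifs <;> push_cast <;> omega

lemma innerA_eq (lista_oczekiwana : List (List Int))
    (ho : 2 ≤ lista_oczekiwana.length →
      ∀ row ∈ lista_oczekiwana, lista_oczekiwana.length ≤ row.length)
    (l1 l2 : Int) (acc : Int) :
    List.foldl (fun pary0 a =>
      List.foldl (fun pary0 b =>
        if PySem.List.pyGetD (PySem.List.pyGetD lista_oczekiwana a []) b 0 = l1 ∧
           PySem.List.pyGetD (PySem.List.pyGetD lista_oczekiwana a []) (b + 1) 0 = l2 then
          pary0 + 1
        else if PySem.List.pyGetD (PySem.List.pyGetD lista_oczekiwana a []) b 0 = l2 ∧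
           PySem.List.pyGetD (PySem.List.pyGetD lista_oczekiwana a []) (b + 1) 0 = l1 then
          pary0 + 1
        else pary0)
        pary0 (PySem.List.pyRange 0 (PySem.List.len lista_oczekiwana - 1)))
      acc (PySem.List.pyRange 0 (PySem.List.len lista_oczekiwana))
    = acc + score (gridPairs lista_oczekiwana) (l1, l2) := by
  rw [PySem.List.foldl_pyRange_zero_pyGetD lista_oczekiwana ([] : List Int)
    (fun pary0 row =>
      List.foldl (fun pary0 b =>
        if PySem.List.pyGetD row b 0 = l1 ∧ PySem.List.pyGetD row (b + 1) 0 = l2 then pary0 + 1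
        else if PySem.List.pyGetD row b 0 = l2 ∧ PySem.List.pyGetD row (b + 1) 0 = l1 then pary0 + 1
        else pary0)
        pary0 (PySem.List.pyRange 0 (PySem.List.len lista_oczekiwana - 1))) acc]
  by_cases hm : 2 ≤ lista_oczekiwana.length
  · have hcongr : List.foldl (fun pary0 row =>
        List.foldl (fun pary0 b =>
          if PySem.List.pyGetD row b 0 = l1 ∧ PySem.List.pyGetD row (b + 1) 0 = l2 then pary0 + 1
          else if PySem.List.pyGetD row b 0 = l2 ∧ PySem.List.pyGetD row (b + 1) 0 = l1 then pary0 + 1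
          else pary0)
          pary0 (PySem.List.pyRange 0 (PySem.List.len lista_oczekiwana - 1))) acc lista_oczekiwana
        = List.foldl (fun pary0 row =>
            List.foldl (fun (acc : Int) (p : Int × Int) =>
              if p.1 = l1 ∧ p.2 = l2 then acc + 1
              else if p.1 = l2 ∧ p.2 = l1 then acc + 1
              else acc) pary0 (rowPairs lista_oczekiwana.length row)) acc lista_oczekiwana := by
      apply PySem.List.foldl_congr_mem
      intro acc row hrow
      have hlen : (PySem.List.len lista_oczekiwana - 1)
          = ((lista_oczekiwana.length : Int) - 1) := by simp
      rw [hlen]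
      exact foldl_idx_eq_foldl_rowPairs row lista_oczekiwana.length (ho hm row hrow)
        (fun acc p1 p2 =>
          if p1 = l1 ∧ p2 = l2 then acc + 1
          else if p1 = l2 ∧ p2 = l1 then acc + 1 else acc) acc
    rw [hcongr, ← List.foldl_flatMap]
    exact count_fold l1 l2 (gridPairs lista_oczekiwana) acc
  · have hnil : PySem.List.pyRange 0 (PySem.List.len lista_oczekiwana - 1) = [] := by
      apply PySem.List.pyRange_one_eq_nil
      simp only [PySem.List.len_eq]
      omega
    rw [hnil]
    simp only [List.foldl_nil, List.foldl_fixed]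
    have hg : gridPairs lista_oczekiwana = [] := by
      unfold gridPairs
      apply List.flatMap_eq_nil_iff.mpr
      intro row _
      exact rowPairs_small lista_oczekiwana.length (by omega) row
    simp [hg, score]

lemma pary_alt_eq (lista_oczekiwana lita_wpisana : List (List Int)) :
    pary_alt lista_oczekiwana lita_wpisana
    = List.foldl (fun t p => t + score (allPairs lista_oczekiwana) p) 0
        (allPairs lita_wpisana) := by
  have hpair : ∀ (row : List Int),
      row.zip (PySem.List.slice row (some 1) none) = adjPairs row := by
    intro row
    rw [PySem.List.slice_from_one]
    rfl
  simp only [pary_alt, hpair]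
  have hcnt : List.foldl (fun (d : PySem.Dict (Int × Int) Int) row =>
      List.foldl (fun d p => d.insert p (d.getD p 0 + 1)) d (adjPairs row))
      PySem.Dict.empty lista_oczekiwana
      = PySem.Dict.counter (allPairs lista_oczekiwana) := by
    rw [← List.foldl_flatMap, PySem.Dict.foldl_insert_getD_add_one_eq_counter]
    rfl
  rw [hcnt, ← List.foldl_flatMap]
  apply PySem.List.foldl_congr_mem
  intro acc p _
  simp only [PySem.Dict.getD_counter, score]
  by_cases hp : p.1 = p.2
  · simp [hp]
  · simp only [hp, ne_eq, not_false_eq_true, if_true]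
    push_cast
    ring

lemma pary_eq (lista_oczekiwana lita_wpisana : List (List Int))
    (hpre : Pre_pary lista_oczekiwana lita_wpisana) :
    pary lista_oczekiwana lita_wpisana
    = List.foldl (fun t p => t + score (gridPairs lista_oczekiwana) p) 0
        (gridPairs lita_wpisana) := by
  obtain ⟨hw, ho⟩ := hpre
  unfold pary
  rw [PySem.List.foldl_pyRange_zero_pyGetD lita_wpisana ([] : List Int)
    (fun pary0 row =>
      List.foldl (fun pary0 y =>
        let liczba1 := PySem.List.pyGetD row y 0
        let liczba2 := PySem.List.pyGetD row (y + 1) 0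
        List.foldl (fun pary0 a =>
          List.foldl (fun pary0 b =>
            if PySem.List.pyGetD (PySem.List.pyGetD lista_oczekiwana a []) b 0 = liczba1 ∧
               PySem.List.pyGetD (PySem.List.pyGetD lista_oczekiwana a []) (b + 1) 0 = liczba2 then
              pary0 + 1
            else if PySem.List.pyGetD (PySem.List.pyGetD lista_oczekiwana a []) b 0 = liczba2 ∧
               PySem.List.pyGetD (PySem.List.pyGetD lista_oczekiwana a []) (b + 1) 0 = liczba1 then
              pary0 + 1
            else pary0)
            pary0 (PySem.List.pyRange 0 (PySem.List.len lista_oczekiwana - 1)))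
          pary0 (PySem.List.pyRange 0 (PySem.List.len lista_oczekiwana)))
        pary0 (PySem.List.pyRange 0 (PySem.List.len lita_wpisana - 1))) 0]
  by_cases hn : 2 ≤ lita_wpisana.length
  · have hstep : List.foldl (fun pary0 row =>
        List.foldl (fun pary0 y =>
          let liczba1 := PySem.List.pyGetD row y 0
          let liczba2 := PySem.List.pyGetD row (y + 1) 0
          List.foldl (fun pary0 a =>
            List.foldl (fun pary0 b =>
              if PySem.List.pyGetD (PySem.List.pyGetD lista_oczekiwana a []) b 0 = liczba1 ∧
                 PySem.List.pyGetD (PySem.List.pyGetD lista_oczekiwana a []) (b + 1) 0 = liczba2 then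
                pary0 + 1
              else if PySem.List.pyGetD (PySem.List.pyGetD lista_oczekiwana a []) b 0 = liczba2 ∧
                 PySem.List.pyGetD (PySem.List.pyGetD lista_oczekiwana a []) (b + 1) 0 = liczba1 then
                pary0 + 1
              else pary0)
              pary0 (PySem.List.pyRange 0 (PySem.List.len lista_oczekiwana - 1)))
            pary0 (PySem.List.pyRange 0 (PySem.List.len lista_oczekiwana)))
          pary0 (PySem.List.pyRange 0 (PySem.List.len lita_wpisana - 1))) 0 lita_wpisana
        = List.foldl (fun pary0 row =>
            List.foldl (fun (t : Int) (p : Int × Int) =>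
              t + score (gridPairs lista_oczekiwana) p)
              pary0 (rowPairs lita_wpisana.length row)) 0 lita_wpisana := by
      apply PySem.List.foldl_congr_mem
      intro acc row hrow
      have hlen : (PySem.List.len lita_wpisana - 1)
          = ((lita_wpisana.length : Int) - 1) := by simp
      rw [hlen,
        foldl_idx_eq_foldl_rowPairs row lita_wpisana.length (hw hn row hrow)
          (fun pary0 l1 l2 =>
            List.foldl (fun pary0 a =>
              List.foldl (fun pary0 b =>
                if PySem.List.pyGetD (PySem.List.pyGetD lista_oczekiwana a []) b 0 = l1 ∧
                   PySem.List.pyGetD (PySem.List.pyGetD lista_oczekiwana a []) (b + 1) 0 = l2 then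
                  pary0 + 1
                else if PySem.List.pyGetD (PySem.List.pyGetD lista_oczekiwana a []) b 0 = l2 ∧
                   PySem.List.pyGetD (PySem.List.pyGetD lista_oczekiwana a []) (b + 1) 0 = l1 then
                  pary0 + 1
                else pary0)
                pary0 (PySem.List.pyRange 0 (PySem.List.len lista_oczekiwana - 1)))
              pary0 (PySem.List.pyRange 0 (PySem.List.len lista_oczekiwana))) acc]
      apply PySem.List.foldl_congr_mem
      intro acc p _
      rw [innerA_eq lista_oczekiwana (ho hn) p.1 p.2 acc]
    rw [hstep, ← List.foldl_flatMap]
    rfl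
  · have hnil : PySem.List.pyRange 0 (PySem.List.len lita_wpisana - 1) = [] := by
      apply PySem.List.pyRange_one_eq_nil
      simp only [PySem.List.len_eq]
      omega
    rw [hnil]
    simp only [List.foldl_nil, List.foldl_fixed]
    have hg : gridPairs lita_wpisana = [] := by
      unfold gridPairs
      apply List.flatMap_eq_nil_iff.mpr
      intro row _
      exact rowPairs_small lita_wpisana.length (by omega) row
    simp [hg]

lemma score_eq_cntM (Y : List (Int × Int)) (p : Int × Int) :
    score Y p = (cntM Y p : Int) := by
  induction Y with
  | nil => simp [score, cntM]
  | cons q Y ih =>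
    obtain ⟨q1, q2⟩ := q
    obtain ⟨p1, p2⟩ := p
    simp only [score, cntM, List.count_cons, List.countP_cons, matchB,
      beq_iff_eq, Prod.mk.injEq, Bool.or_eq_true] at ih ⊢
    by_cases hp : p1 = p2 <;> by_cases h1 : q1 = p1 <;> by_cases h2 : q2 = p2 <;>
      by_cases h3 : q1 = p2 <;> by_cases h4 : q2 = p1 <;>
      simp_all <;> omega

lemma foldl_score (Y : List (Int × Int)) (X : List (Int × Int)) (acc : Int) :
    List.foldl (fun t p => t + score Y p) acc X = acc + (totS X Y : Int) := by
  induction X generalizing acc with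
  | nil => simp [totS]
  | cons p X ih =>
    rw [List.foldl_cons, ih, score_eq_cntM]
    simp only [totS, List.map_cons, List.sum_cons]
    push_cast
    ring

lemma totS_append (X1 X2 Y : List (Int × Int)) :
    totS (X1 ++ X2) Y = totS X1 Y + totS X2 Y := by
  simp [totS]

lemma totS_flatMap {α : Type} (l : List α) (f : α → List (Int × Int)) (Y : List (Int × Int)) :
    totS (l.flatMap f) Y = (l.map (fun r => totS (f r) Y)).sum := by
  induction l with
  | nil => simp [totS]
  | cons r l ih => simp [List.flatMap_cons, totS_append, ih]

lemma cntM_append (Y1 Y2 : List (Int × Int)) (p : Int × Int) :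
    cntM (Y1 ++ Y2) p = cntM Y1 p + cntM Y2 p := by
  simp [cntM, List.countP_append]

lemma sum_map_split {α : Type} (l : List α) (f g : α → Nat) :
    (l.map fun x => f x + g x).sum = (l.map f).sum + (l.map g).sum := by
  induction l with
  | nil => simp
  | cons x l ih => simp [ih]; omega

lemma all_eq_kept_append_drop_X (g : List (List Int)) (Y : List (Int × Int)) :
    totS (allPairs g) Y = totS (keptPairs g) Y + totS (dropPairs g) Y := by
  unfold allPairs keptPairs dropPairs
  rw [totS_flatMap, totS_flatMap, totS_flatMap, ← sum_map_split]
  congr 1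
  apply List.map_congr_left
  intro r _
  conv_lhs => rw [← List.take_append_drop (g.length - 1) (adjPairs r)]
  rw [totS_append]

lemma cntM_flatMap {α : Type} (l : List α) (f : α → List (Int × Int)) (p : Int × Int) :
    cntM (l.flatMap f) p = (l.map (fun r => cntM (f r) p)).sum := by
  induction l with
  | nil => simp [cntM]
  | cons r l ih => simp [List.flatMap_cons, cntM_append, ih]

lemma cntM_all_split (g : List (List Int)) (p : Int × Int) :
    cntM (allPairs g) p = cntM (keptPairs g) p + cntM (dropPairs g) p := by
  unfold allPairs keptPairs dropPairs
  rw [cntM_flatMap, cntM_flatMap, cntM_flatMap, ← sum_map_split]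
  congr 1
  apply List.map_congr_left
  intro r _
  conv_lhs => rw [← List.take_append_drop (g.length - 1) (adjPairs r)]
  rw [cntM_append]

lemma all_eq_kept_append_drop_Y (X : List (Int × Int)) (g : List (List Int)) :
    totS X (allPairs g) = totS X (keptPairs g) + totS X (dropPairs g) := by
  unfold totS
  rw [List.map_congr_left (fun p _ => cntM_all_split g p), sum_map_split]

lemma totS_pos_iff (X Y : List (Int × Int)) :
    0 < totS X Y ↔ ∃ p ∈ X, ∃ q ∈ Y, matchB p q = true := by
  unfold totS cntM
  constructor
  · intro h
    obtain ⟨x, hx, hxpos⟩ : ∃ x ∈ X.map (fun p => Y.countP (matchB p)), 0 < x := by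
      by_contra hc
      push Not at hc
      have hz : (X.map (fun p => Y.countP (matchB p))).sum = 0 :=
        List.sum_eq_zero (fun x hx => Nat.le_zero.mp (hc x hx))
      omega
    obtain ⟨p, hp, rfl⟩ := List.mem_map.mp hx
    obtain ⟨q, hq, hm⟩ := List.countP_pos_iff.mp hxpos
    exact ⟨p, hp, q, hq, hm⟩
  · rintro ⟨p, hp, q, hq, hm⟩
    have h1 : 0 < Y.countP (matchB p) := List.countP_pos_iff.mpr ⟨q, hq, hm⟩
    have h2 : Y.countP (matchB p) ≤ (X.map (fun p => Y.countP (matchB p))).sum :=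
      List.le_sum_of_mem (List.mem_map_of_mem hp)
    omega

lemma key_decomp (lista_oczekiwana lita_wpisana : List (List Int))
    (hpre : Pre_pary lista_oczekiwana lita_wpisana) :
    pary_alt lista_oczekiwana lita_wpisana
    = pary lista_oczekiwana lita_wpisana
      + (totS (dropPairs lita_wpisana) (allPairs lista_oczekiwana) : Int)
      + (totS (keptPairs lita_wpisana) (dropPairs lista_oczekiwana) : Int) := by
  rw [pary_eq _ _ hpre, pary_alt_eq, foldl_score, foldl_score,
    gridPairs_eq_kept, gridPairs_eq_kept]
  have h1 : totS (allPairs lita_wpisana) (allPairs lista_oczekiwana)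
      = totS (keptPairs lita_wpisana) (allPairs lista_oczekiwana)
        + totS (dropPairs lita_wpisana) (allPairs lista_oczekiwana) :=
    all_eq_kept_append_drop_X _ _
  have h2 : totS (keptPairs lita_wpisana) (allPairs lista_oczekiwana)
      = totS (keptPairs lita_wpisana) (keptPairs lista_oczekiwana)
        + totS (keptPairs lita_wpisana) (dropPairs lista_oczekiwana) :=
    all_eq_kept_append_drop_Y _ _
  rw [h1, h2]
  push_cast
  ring

-- ===== VERDICT (by name: the statements are the Claim_ definitions above) =====
theorem pary_spec : Claim_unchanged_pary := by
  intro lista_oczekiwana lita_wpisana _ hpre hnd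
  unfold D_pary hits at hnd
  simp only [pairsFrom_zero, pairsFrom_bound, ← matchB_iff] at hnd
  push Not at hnd
  rw [key_decomp _ _ hpre]
  have h1 : totS (dropPairs lita_wpisana) (allPairs lista_oczekiwana) = 0 := by
    by_contra h
    obtain ⟨p, hp, q, hq, hm⟩ := (totS_pos_iff _ _).1 (Nat.pos_of_ne_zero h)
    exact absurd hm (by simpa using hnd.1 p hp q hq)
  have h2 : totS (keptPairs lita_wpisana) (dropPairs lista_oczekiwana) = 0 := by
    by_contra h
    obtain ⟨p, hp, q, hq, hm⟩ := (totS_pos_iff _ _).1 (Nat.pos_of_ne_zero h)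
    exact absurd hm (by simpa using hnd.2 p (kept_mem_all hp) q hq)
  rw [h1, h2]
  simp

theorem pary_changed : Claim_changed_pary := by
  unfold Claim_changed_pary
  refine ⟨by decide, by decide, ?_, by decide, by decide, by decide⟩
  unfold D_pary hits
  decide

theorem pary_tight : Claim_exact_pary := by
  intro lista_oczekiwana lita_wpisana _ hpre hd
  unfold D_pary hits at hd
  simp only [pairsFrom_zero, pairsFrom_bound, ← matchB_iff] at hd
  have key := key_decomp lista_oczekiwana lita_wpisana hpre
  intro heq
  rw [← heq] at key
  rcases hd with ⟨p, hp, q, hq, hm⟩ | ⟨p, hp, q, hq, hm⟩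
  · have hA : 0 < totS (dropPairs lita_wpisana) (allPairs lista_oczekiwana) :=
      (totS_pos_iff _ _).2 ⟨p, hp, q, hq, hm⟩
    omega
  · have hA : 0 < totS (allPairs lita_wpisana) (dropPairs lista_oczekiwana) :=
      (totS_pos_iff _ _).2 ⟨p, hp, q, hq, hm⟩
    have e1 := all_eq_kept_append_drop_X lita_wpisana (dropPairs lista_oczekiwana)
    have e2 := all_eq_kept_append_drop_Y (dropPairs lita_wpisana) lista_oczekiwana
    omega
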